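-- pv_equiv track=rewrite | github.com/daniilspivak/asset-validation-tool | validator.py | _is_under_ignored_dir
-- ===== SOURCE A (Python) =====
-- def _norm(p: str) -> str:
--     return p.replace("\\", "/").lower()
--
-- def _is_under_ignored_dir(rel_path: str, ignore_dirs: list[str]) -> bool:
--     p = _norm(rel_path)
--     for d in ignore_dirs or []:
--         dd = _norm(d).strip("/")
--         if not dd:
--             continue
--         if p == dd or p.startswith(dd + "/"):
--             return True
--     return False
-- ===== SOURCE B (Python) =====
-- def _is_under_ignored_dir(rel_path: str, ignore_dirs: list[str]) -> bool:
--     p = rel_path.replace("\\", "/").lower()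
--     ignore = set()
--     for d in (ignore_dirs or []):
--         dd = d.replace("\\", "/").lower().strip("/")
--         if dd:
--             ignore.add(dd)
--     prefixes = {p[:i] for i, ch in enumerate(p) if ch == "/"}
--     prefixes.add(p)
--     return not ignore.isdisjoint(prefixes)
-- ===== Notes on version B (the rewrite author's own statement) =====
-- stated objective: alternative
-- what changed: B builds a set of normalized ignore dirs once and enumerates the path's '/'-boundary prefixes (plus the path itself), answering via a set-disjointness test, instead of A's scan of the ignore list with a startswith test per entry.
import Mathlib
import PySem

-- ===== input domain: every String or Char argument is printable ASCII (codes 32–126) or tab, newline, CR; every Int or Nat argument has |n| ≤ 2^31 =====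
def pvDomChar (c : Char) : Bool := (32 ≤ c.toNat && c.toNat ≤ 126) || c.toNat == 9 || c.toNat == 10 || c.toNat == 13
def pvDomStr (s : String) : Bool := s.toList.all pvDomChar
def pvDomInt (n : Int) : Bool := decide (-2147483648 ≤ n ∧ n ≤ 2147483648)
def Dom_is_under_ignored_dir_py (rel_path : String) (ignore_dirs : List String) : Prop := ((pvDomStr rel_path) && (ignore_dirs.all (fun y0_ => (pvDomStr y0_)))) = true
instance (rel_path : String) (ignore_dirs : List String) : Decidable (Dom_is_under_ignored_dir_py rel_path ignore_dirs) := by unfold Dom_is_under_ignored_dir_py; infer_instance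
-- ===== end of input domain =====

-- B replaces A's scan of the ignore list with startswith tests by a set of normalized ignore dirs
-- probed with the path's own '/'-boundary prefixes (alternative decomposition; no speed claim).

-- ===== PORT A =====
-- _norm(p) = p.replace("\\", "/").lower()
def pvNorm (p : String) : String := PySem.Str.lower (PySem.Str.replace p "\\" "/")

-- the for-loop with 'continue' and 'return True' is the 'any' over ignore_dirs ('ignore_dirs or []' = ignore_dirs for a list)
def is_under_ignored_dir_py (rel_path : String) (ignore_dirs : List String) : Bool :=
  let p := pvNorm rel_path
  ignore_dirs.any (fun d =>
    let dd := PySem.Str.stripChars (pvNorm d) "/"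
    if dd = "" then false
    else p == dd || PySem.Str.startswith p (dd ++ "/"))

-- ===== PORT B =====
def is_under_ignored_dir_py_alt (rel_path : String) (ignore_dirs : List String) : Bool :=
  let p := PySem.Str.lower (PySem.Str.replace rel_path "\\" "/")
  let ignore : PySem.Set String := ignore_dirs.foldl
    (fun s d =>
      let dd := PySem.Str.stripChars (PySem.Str.lower (PySem.Str.replace d "\\" "/")) "/"
      if dd = "" then s else PySem.Set.add s dd)
    PySem.Set.empty
  -- {p[:i] for i, ch in enumerate(p) if ch == "/"} — p[:i] = Str.slice p none (some i); then prefixes.add(p)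
  let prefixes : PySem.Set String := PySem.Set.ofList
    ((PySem.List.enumerate p.toList).filterMap
      (fun ic => if ic.2 = '/' then some (PySem.Str.slice p none (some ic.1)) else none))
  let prefixes := PySem.Set.add prefixes p
  !(PySem.Set.isdisjoint ignore prefixes)

-- ===== PRECONDITION & SPEC =====
def Spec_is_under_ignored_dir_py (rel_path : String) (ignore_dirs : List String) (out : Bool) : Prop := out = is_under_ignored_dir_py_alt rel_path ignore_dirs
instance (rel_path : String) (ignore_dirs : List String) (out : Bool) : Decidable (Spec_is_under_ignored_dir_py rel_path ignore_dirs out) := by unfold Spec_is_under_ignored_dir_py; infer_instance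

-- ===== CLAIM (what is proved, stated in full; the proofs are below) =====
def Claim_equal_is_under_ignored_dir_py : Prop := ∀ (rel_path : String) (ignore_dirs : List String), Dom_is_under_ignored_dir_py rel_path ignore_dirs → Spec_is_under_ignored_dir_py rel_path ignore_dirs (is_under_ignored_dir_py rel_path ignore_dirs)

-- ===== LEMMAS AND PROOFS =====

theorem pv_str_eq_iff (a b : String) : a = b ↔ a.toList = b.toList :=
  ⟨fun h => h ▸ rfl, fun h => by have := congrArg String.ofList h; simpa using this⟩

-- (xs ++ [c]) is a prefix of ys iff xs is ys cut at an occurrence of c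
theorem pv_append_singleton_prefix (xs ys : List Char) (c : Char) :
    (xs ++ [c]) <+: ys ↔ ∃ k, ∃ h : k < ys.length, ys[k] = c ∧ xs = ys.take k := by
  constructor
  · rintro ⟨t, ht⟩
    refine ⟨xs.length, ?_, ?_, ?_⟩ <;> subst ht <;> simp
  · rintro ⟨k, hk, hc, hx⟩
    subst hx
    have h1 : ys.take k ++ [c] = ys.take (k + 1) := by
      rw [List.take_add_one]
      simp [List.getElem?_eq_getElem hk, hc]
    rw [h1]
    exact List.take_prefix _ _

-- A's per-dir test (p equals dd, or dd/"/" starts p) ⟷ dd is one of p's '/'-boundary prefixes or p itself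
theorem pv_crux (p dd : String) :
    (p = dd ∨ PySem.Str.startswith p (dd ++ "/") = true) ↔
    (dd = p ∨ ∃ k, ∃ _h : k < p.toList.length, p.toList[k] = '/' ∧
        dd = PySem.Str.slice p none (some (k : Int))) := by
  have hsw : PySem.Str.startswith p (dd ++ "/") = true ↔ (dd.toList ++ ['/']) <+: p.toList := by
    simp [PySem.Chars.startswith_iff]
  rw [hsw, pv_append_singleton_prefix]
  constructor
  · rintro (h | ⟨k, hk, hc, hx⟩)
    · exact Or.inl h.symm
    · exact Or.inr ⟨k, hk, hc, by rw [pv_str_eq_iff]; simp [hx, PySem.List.slice_to]⟩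
  · rintro (h | ⟨k, hk, hc, hx⟩)
    · exact Or.inl h.symm
    · refine Or.inr ⟨k, hk, hc, ?_⟩
      rw [pv_str_eq_iff] at hx; simpa [PySem.List.slice_to] using hx

-- membership in the conditionally-built ignore set
theorem pv_mem_ignore_foldl (g : String → String) (dirs : List String) (s : List String) (x : String) :
    x ∈ dirs.foldl (fun s d => if g d = "" then s else PySem.Set.add s (g d)) s ↔
    x ∈ s ∨ ∃ d ∈ dirs, g d = x ∧ g d ≠ "" := by
  induction dirs generalizing s with
  | nil => simp
  | cons d dirs ih =>
    simp only [List.foldl_cons]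
    by_cases h : g d = "" <;> simp only [h, if_pos, ih] <;> simp [h] <;> tauto

-- the two ports agree, for any normalizer g of the ignore entries
theorem pv_key (p : String) (g : String → String) (dirs : List String) :
    (dirs.any fun d => if g d = "" then false else (p == g d || PySem.Str.startswith p (g d ++ "/")))
    = !(PySem.Set.isdisjoint (dirs.foldl (fun s d => if g d = "" then s else PySem.Set.add s (g d)) PySem.Set.empty)
        (PySem.Set.add (PySem.Set.ofList ((PySem.List.enumerate p.toList).filterMap
           (fun ic => if ic.2 = '/' then some (PySem.Str.slice p none (some ic.1)) else none))) p)) := by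
  rw [Bool.eq_iff_iff]
  simp only [List.any_eq_true, Bool.not_eq_true', Bool.eq_false_iff, ne_eq, PySem.Set.isdisjoint_iff]
  push_neg
  simp only [pv_mem_ignore_foldl, PySem.Set.mem_add, PySem.Set.mem_ofList, List.mem_filterMap,
    PySem.List.mem_enumerate_iff]
  constructor
  · rintro ⟨d, hd, hcond⟩
    by_cases h : g d = ""
    · simp [h] at hcond
    · simp only [h, if_false] at hcond
      rw [Bool.or_eq_true, beq_iff_eq] at hcond
      have := (pv_crux p (g d)).mp (by tauto)
      refine ⟨g d, Or.inr ⟨d, hd, rfl, h⟩, ?_⟩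
      rcases this with h1 | ⟨k, hk, hc, hx⟩
      · exact Or.inr h1
      · exact Or.inl ⟨(k, '/'), ⟨k, hk, by simp [hc]⟩, by simp [hx]⟩
  · rintro ⟨x, hxI, hxP⟩
    rcases hxI with hxI | ⟨d, hd, hgx, hne⟩
    · simp at hxI
    · subst hgx
      refine ⟨d, hd, ?_⟩
      simp only [hne, if_false]
      rw [Bool.or_eq_true, beq_iff_eq]
      apply (pv_crux p (g d)).mpr
      rcases hxP with ⟨ic, ⟨k, hk, hik⟩, hsome⟩ | h1
      · subst hik
        simp only [zero_add] at hsome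
        by_cases hc : p.toList[k] = '/'
        · refine Or.inr ⟨k, hk, hc, ?_⟩
          simp [hc] at hsome
          exact hsome.symm
        · simp [hc] at hsome
      · exact Or.inl h1

-- ===== VERDICT (by name: the statement is the Claim_ definition above) =====
theorem is_under_ignored_dir_py_spec : Claim_equal_is_under_ignored_dir_py := by
  intro rel_path ignore_dirs _
  unfold Spec_is_under_ignored_dir_py is_under_ignored_dir_py is_under_ignored_dir_py_alt pvNorm
  exact pv_key (PySem.Str.lower (PySem.Str.replace rel_path "\\" "/"))
    (fun d => PySem.Str.stripChars (PySem.Str.lower (PySem.Str.replace d "\\" "/")) "/") ignore_dirs
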